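-- pv_equiv track=rewrite | github.com/rvbrusov/BR_project | tensor_matrix_test_2026_04_23_v14.py | _signature_to_plane_letters
-- ===== SOURCE A (Python) =====
-- from typing import Dict, List, Optional, Tuple
--
-- ROWS = 3
--
-- COLS = 4
--
-- def _signature_to_plane_letters(signature: List[List[str]], alphabet_order: List[str]) -> List[List[str]]:
--     out = [["" for _ in range(COLS)] for _ in range(ROWS)]
--     token_to_letter: Dict[str, str] = {}
--     next_index = 0
--     for r in range(ROWS):
--         for c in range(COLS):
--             token = signature[r][c]
--             if token not in token_to_letter:
--                 token_to_letter[token] = alphabet_order[next_index]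
--                 next_index += 1
--             out[r][c] = token_to_letter[token]
--     return out
-- ===== SOURCE B (Python) =====
-- ROWS = 3
--
-- COLS = 4
--
-- def _signature_to_plane_letters(signature, alphabet_order):
--     flat = [signature[r][c] for r in range(ROWS) for c in range(COLS)]
--
--     def letter(tok):
--         first = flat.index(tok)
--         return alphabet_order[len(set(flat[:first]))]
--
--     return [[letter(signature[r][c]) for c in range(COLS)] for r in range(ROWS)]
-- ===== Notes on version B (the rewrite author's own statement) =====
-- stated objective: alternative
-- what changed: B keeps no mapping at all: for every cell it computes the letter index directly as the number of distinct tokens occurring strictly before the token's first occurrence in the row-major flattening (list.index + len(set(prefix))), instead of A's stateful scan that mutates a token-to-letter dict and a counter while writing output cells.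
import Mathlib
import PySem

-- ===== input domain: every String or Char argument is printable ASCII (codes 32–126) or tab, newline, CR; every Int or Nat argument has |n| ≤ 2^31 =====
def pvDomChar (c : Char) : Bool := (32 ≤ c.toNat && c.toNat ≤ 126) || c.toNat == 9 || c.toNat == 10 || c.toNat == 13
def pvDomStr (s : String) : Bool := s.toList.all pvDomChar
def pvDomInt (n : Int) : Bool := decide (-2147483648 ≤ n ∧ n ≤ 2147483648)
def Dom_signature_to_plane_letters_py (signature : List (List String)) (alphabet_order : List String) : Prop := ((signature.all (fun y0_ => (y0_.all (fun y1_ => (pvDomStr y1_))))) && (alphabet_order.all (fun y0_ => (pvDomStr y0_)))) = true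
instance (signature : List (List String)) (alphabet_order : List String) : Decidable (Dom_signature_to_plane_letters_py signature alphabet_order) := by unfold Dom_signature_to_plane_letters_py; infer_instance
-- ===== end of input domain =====

-- B keeps no token→letter mapping: each cell's letter index is computed directly as the
-- number of distinct tokens before its token's first occurrence in the row-major flattening
-- (list.index + len(set(prefix))), instead of A's stateful dict+counter scan.

-- signature[r][c], shared accessor helper (both Pythons use the identical subscript expression);
-- total via getD "" — out-of-range reads (Python IndexError) are excluded by Pre_.
def pvTok (signature : List (List String)) (r c : Int) : String :=
  (PySem.List.pyGet? ((PySem.List.pyGet? signature r).getD []) c).getD ""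

-- ===== PORT A =====
-- out[r][c] = v  (r, c are the loop counters, always in range of the fresh 3×4 grid)
def pvSet2 (out : List (List String)) (r c : Nat) (v : String) : List (List String) :=
  out.set r ((out.getD r []).set c v)

-- one iteration of A's inner loop body; state = (out, token_to_letter, next_index)
def pvAStep (signature : List (List String)) (alphabet_order : List String)
    (st : List (List String) × PySem.Dict String String × Int) (rc : Int × Int) :
    List (List String) × PySem.Dict String String × Int :=
  let token := pvTok signature rc.1 rc.2
  if st.2.1.contains token then
    (pvSet2 st.1 rc.1.toNat rc.2.toNat (st.2.1.getD token ""), st.2.1, st.2.2)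
  else
    let d' := st.2.1.insert token ((PySem.List.pyGet? alphabet_order st.2.2).getD "")
    (pvSet2 st.1 rc.1.toNat rc.2.toNat (d'.getD token ""), d', st.2.2 + 1)

def signature_to_plane_letters_py (signature : List (List String)) (alphabet_order : List String) : List (List String) :=
  (((PySem.List.pyRange 0 3 1).flatMap (fun r => (PySem.List.pyRange 0 4 1).map (fun c => (r, c)))).foldl
      (pvAStep signature alphabet_order)
      (List.replicate 3 (List.replicate 4 ""), PySem.Dict.empty, 0)).1

-- ===== PORT B =====
-- letter(tok): first = flat.index(tok); alphabet_order[len(set(flat[:first]))]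
-- (tok always occurs in flat when called, so .index never raises; the alphabet read is
-- total via getD "" — the out-of-range case is excluded by Pre_.)
def pvLetterB (alphabet_order : List String) (flat : List String) (tok : String) : String :=
  (PySem.List.pyGet? alphabet_order
    ((PySem.Set.ofList (PySem.List.slice flat none
        (some (((PySem.List.index? flat tok).getD 0 : Nat) : Int)))).length : Int)).getD ""

def signature_to_plane_letters_py_alt (signature : List (List String)) (alphabet_order : List String) : List (List String) :=
  let flat := (PySem.List.pyRange 0 3 1).flatMap
      (fun r => (PySem.List.pyRange 0 4 1).map (fun c => pvTok signature r c))
  (PySem.List.pyRange 0 3 1).map (fun r =>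
    (PySem.List.pyRange 0 4 1).map (fun c => pvLetterB alphabet_order flat (pvTok signature r c)))

-- ===== PRECONDITION & SPEC =====
-- Pre_: exactly where the Python A returns without raising: at least 3 rows, the first 3 rows have
-- at least 4 columns (else IndexError on signature[r][c]), and the alphabet has a letter for every
-- distinct token of the 3×4 window (else IndexError on alphabet_order[next_index]).
def Pre_signature_to_plane_letters_py (signature : List (List String)) (alphabet_order : List String) : Prop :=
  3 ≤ signature.length ∧ (∀ row ∈ signature.take 3, 4 ≤ row.length) ∧
  (PySem.List.dedup (((signature.take 3).map (fun row => row.take 4)).flatten)).length ≤ alphabet_order.length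
instance (signature : List (List String)) (alphabet_order : List String) : Decidable (Pre_signature_to_plane_letters_py signature alphabet_order) := by unfold Pre_signature_to_plane_letters_py; infer_instance

def pvWitness_signature_to_plane_letters_py : List (List String) × List String :=
  ([["a", "b", "a", "a"], ["b", "a", "c", "a"], ["a", "a", "b", "c"]], ["x", "y", "z"])

def Spec_signature_to_plane_letters_py (signature : List (List String)) (alphabet_order : List String) (out : List (List String)) : Prop := out = signature_to_plane_letters_py_alt signature alphabet_order
instance (signature : List (List String)) (alphabet_order : List String) (out : List (List String)) : Decidable (Spec_signature_to_plane_letters_py signature alphabet_order out) := by unfold Spec_signature_to_plane_letters_py; infer_instance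

-- ===== CLAIM (what is proved, stated in full; the proofs are below) =====
def Claim_equal_signature_to_plane_letters_py : Prop := ∀ (signature : List (List String)) (alphabet_order : List String), Dom_signature_to_plane_letters_py signature alphabet_order → Pre_signature_to_plane_letters_py signature alphabet_order → Spec_signature_to_plane_letters_py signature alphabet_order (signature_to_plane_letters_py signature alphabet_order)

-- ===== LEMMAS AND PROOFS =====

-- A's dict/counter evolution, abstracted over the flat token sequence.
def pvBuild (alph : List String) (d : PySem.Dict String String) (ni : Int) : List String → PySem.Dict String String
  | [] => d
  | t :: ts =>
    if d.contains t then pvBuild alph d ni ts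
    else pvBuild alph (d.insert t ((PySem.List.pyGet? alph ni).getD "")) (ni + 1) ts

-- the flat sequence of letters A writes into out, in row-major order
def pvOutsA (alph : List String) (d : PySem.Dict String String) (ni : Int) : List String → List String
  | [] => []
  | t :: ts =>
    if d.contains t then d.getD t "" :: pvOutsA alph d ni ts
    else
      let d' := d.insert t ((PySem.List.pyGet? alph ni).getD "")
      d'.getD t "" :: pvOutsA alph d' (ni + 1) ts

-- the tokens of ts not yet in `seen`, first occurrences in order
def pvNewKeys (seen : List String) : List String → List String
  | [] => []
  | t :: ts => if t ∈ seen then pvNewKeys seen ts else t :: pvNewKeys (seen ++ [t]) ts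

-- writing values at positions, row-major
def pvWrite (out : List (List String)) : List (Int × Int) → List String → List (List String)
  | [], _ => out
  | _ :: _, [] => out
  | rc :: ps, v :: vs => pvWrite (pvSet2 out rc.1.toNat rc.2.toNat v) ps vs

theorem pvBuild_stable (alph : List String) (t : String) :
    ∀ (ts : List String) (d : PySem.Dict String String) (ni : Int),
      d.contains t = true → (pvBuild alph d ni ts).get? t = d.get? t := by
  intro ts
  induction ts with
  | nil => intro d ni _; rfl
  | cons t' ts ih =>
    intro d ni h
    by_cases h' : d.contains t' = true
    · simp [pvBuild, h', ih d ni h]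
    · have hne : t ≠ t' := by
        intro he; rw [he] at h; exact h' h
      have h2 : (d.insert t' ((PySem.List.pyGet? alph ni).getD "")).contains t = true := by
        simp [PySem.Dict.contains_insert, h]
      rw [Bool.not_eq_true] at h'
      simp only [pvBuild, h', Bool.false_eq_true, if_false]
      rw [ih _ _ h2, PySem.Dict.get?_insert_of_ne d _ hne]

theorem pvOutsA_eq_map (alph : List String) :
    ∀ (ts : List String) (d : PySem.Dict String String) (ni : Int),
      pvOutsA alph d ni ts = ts.map (fun t => (pvBuild alph d ni ts).getD t "") := by
  intro ts
  induction ts with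
  | nil => intro d ni; rfl
  | cons t ts ih =>
    intro d ni
    by_cases h : d.contains t = true
    · simp only [pvOutsA, pvBuild, h, if_true, List.map_cons]
      have hg : (pvBuild alph d ni ts).getD t "" = d.getD t "" := by
        simp [PySem.Dict.getD, pvBuild_stable alph t ts d ni h]
      rw [ih d ni, hg]
    · rw [Bool.not_eq_true] at h
      simp only [pvOutsA, pvBuild, h, Bool.false_eq_true, if_false, List.map_cons]
      have hc : (d.insert t ((PySem.List.pyGet? alph ni).getD "")).contains t = true :=
        PySem.Dict.contains_insert_self d t _
      have hg : (pvBuild alph (d.insert t ((PySem.List.pyGet? alph ni).getD "")) (ni + 1) ts).getD t "" = (d.insert t ((PySem.List.pyGet? alph ni).getD "")).getD t "" := by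
        simp [PySem.Dict.getD, pvBuild_stable alph t ts _ (ni + 1) hc]
      rw [ih _ _, hg]

-- A's fold, related to pvWrite/pvOutsA over any position list
theorem pvFoldA_eq_write (signature : List (List String)) (alphabet_order : List String) :
    ∀ (ps : List (Int × Int)) (out : List (List String)) (d : PySem.Dict String String) (ni : Int),
      (ps.foldl (pvAStep signature alphabet_order) (out, d, ni)).1 =
        pvWrite out ps (pvOutsA alphabet_order d ni (ps.map (fun rc => pvTok signature rc.1 rc.2))) := by
  intro ps
  induction ps with
  | nil => intro out d ni; rfl
  | cons rc ps ih =>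
    intro out d ni
    by_cases h : d.contains (pvTok signature rc.1 rc.2) = true
    · simp only [List.foldl_cons, List.map_cons, pvAStep, pvOutsA, h, if_true, pvWrite]
      exact ih _ _ _
    · simp only [List.foldl_cons, List.map_cons, pvAStep, pvOutsA, h]
      exact ih _ _ _

theorem pvNewKeys_eq_foldl_add :
    ∀ (ts : List String) (seen : PySem.Set String),
      ts.foldl PySem.Set.add seen = seen ++ pvNewKeys seen ts := by
  intro ts
  induction ts with
  | nil => intro seen; simp [pvNewKeys]
  | cons t ts ih =>
    intro seen
    by_cases h : t ∈ seen
    · simp only [pvNewKeys, h, if_true, List.foldl_cons, PySem.Set.add_of_mem h]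
      exact ih seen
    · simp only [pvNewKeys, h, if_false, List.foldl_cons, PySem.Set.add_of_not_mem h]
      rw [ih (seen ++ [t]), List.append_assoc]
      rfl

theorem pvNewKeys_nil_eq_dedup (ts : List String) :
    pvNewKeys [] ts = PySem.List.dedup ts := by
  rw [PySem.List.dedup_eq_ofList, PySem.Set.ofList_eq_foldl]
  have := pvNewKeys_eq_foldl_add ts []
  simpa using this.symm

-- the key B-side characterisation: A's final dict maps t (first seen at index p of the flat
-- token list) to alphabet_order[ni + number of new tokens among the first p]
theorem pvBuild_getD (alph : List String) :
    ∀ (ts : List String) (d : PySem.Dict String String) (ni : Int) (t : String),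
      t ∈ ts → d.contains t = false →
      (pvBuild alph d ni ts).getD t "" =
        (PySem.List.pyGet? alph
          (ni + ((pvNewKeys d.keys (ts.take ((PySem.List.index? ts t).getD 0))).length : Int))).getD "" := by
  intro ts
  induction ts with
  | nil => intro d ni t h; exact absurd h (List.not_mem_nil)
  | cons t' ts ih =>
    intro d ni t hmem hfc
    by_cases he : t' = t
    · subst he
      rw [PySem.List.index?_cons_self]
      simp only [Option.getD_some, List.take_zero, pvNewKeys, List.length_nil,
        Int.natCast_zero, add_zero]
      simp only [pvBuild, hfc, Bool.false_eq_true, if_false]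
      have hc : (d.insert t' ((PySem.List.pyGet? alph ni).getD "")).contains t' = true :=
        PySem.Dict.contains_insert_self d t' _
      simp [PySem.Dict.getD, pvBuild_stable alph t' ts _ (ni + 1) hc,
        PySem.Dict.get?_insert_self]
    · have hmem' : t ∈ ts := by
        rcases hmem with _ | h
        · exact absurd rfl he
        · assumption
      obtain ⟨p, hp⟩ : ∃ p, PySem.List.index? ts t = some p := by
        have := (PySem.List.index?_isSome_iff ts t).mpr hmem'
        exact Option.isSome_iff_exists.mp this
      rw [PySem.List.index?_cons_of_ne ts he, hp]
      simp only [Option.map_some, Option.getD_some, List.take_succ_cons]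
      by_cases h : d.contains t' = true
      · have hk : t' ∈ d.keys := (PySem.Dict.contains_iff_mem_keys d t').mp h
        simp only [pvBuild, pvNewKeys, h, hk, if_true]
        have := ih d ni t hmem' hfc
        rw [hp] at this
        simpa using this
      · rw [Bool.not_eq_true] at h
        have hk : t' ∉ d.keys := by
          intro hmk
          rw [(PySem.Dict.contains_iff_mem_keys d t').mpr hmk] at h
          exact Bool.true_eq_false.mp h
        have hkeys : (d.insert t' ((PySem.List.pyGet? alph ni).getD "")).keys = d.keys ++ [t'] :=
          PySem.Dict.keys_insert_of_not_contains d _ h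
        have hfc' : (d.insert t' ((PySem.List.pyGet? alph ni).getD "")).contains t = false := by
          rw [PySem.Dict.contains_insert]
          simp [hfc, Ne.symm he]
        simp only [pvBuild, pvNewKeys, h, Bool.false_eq_true, if_false, if_neg hk,
          List.length_cons]
        have := ih (d.insert t' ((PySem.List.pyGet? alph ni).getD "")) (ni + 1) t hmem' hfc'
        rw [hp, hkeys] at this
        simp only [Option.getD_some] at this
        rw [this]
        congr 2
        push_cast
        omega

-- instantiated at the empty dict, this is exactly B's per-cell letter computation
theorem pvBuild_getD_letter (alph : List String) (ts : List String) (t : String) (h : t ∈ ts) :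
    (pvBuild alph PySem.Dict.empty 0 ts).getD t "" = pvLetterB alph ts t := by
  have hfc : (PySem.Dict.empty : PySem.Dict String String).contains t = false := rfl
  rw [pvBuild_getD alph ts PySem.Dict.empty 0 t h hfc]
  unfold pvLetterB
  have hek : (PySem.Dict.empty : PySem.Dict String String).keys = [] := rfl
  rw [hek, pvNewKeys_nil_eq_dedup]
  rw [PySem.List.slice_to_natCast]
  rw [PySem.List.dedup_eq_ofList]
  simp

-- ===== VERDICT (by name: the statement is the Claim_ definition above) =====
theorem signature_to_plane_letters_py_spec : Claim_equal_signature_to_plane_letters_py := by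
  intro signature alphabet_order _ _
  unfold Spec_signature_to_plane_letters_py
  show signature_to_plane_letters_py signature alphabet_order = _
  unfold signature_to_plane_letters_py
  rw [pvFoldA_eq_write]
  rw [pvOutsA_eq_map]
  have h3 : PySem.List.pyRange 0 3 1 = [0, 1, 2] := by decide
  have h4 : PySem.List.pyRange 0 4 1 = [0, 1, 2, 3] := by decide
  have hflat : (((PySem.List.pyRange 0 3 1).flatMap
        (fun r => (PySem.List.pyRange 0 4 1).map (fun c => (r, c)))).map
          (fun rc => pvTok signature rc.1 rc.2)) =
      ((PySem.List.pyRange 0 3 1).flatMap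
        (fun r => (PySem.List.pyRange 0 4 1).map (fun c => pvTok signature r c))) := by
    simp [h3, h4]
  rw [hflat]
  rw [List.map_congr_left (fun t ht => pvBuild_getD_letter alphabet_order _ t ht)]
  unfold signature_to_plane_letters_py_alt
  simp only [h3, h4, List.flatMap_cons, List.flatMap_nil, List.map_cons, List.map_nil,
    List.append_nil, List.cons_append, List.nil_append]
  rfl
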